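-- pv_equiv track=rewrite | github.com/daniel-reich/ubiquitous-fiesta | W7S25BPmjEMSzpnaB_3.py | bonacci
-- ===== SOURCE A (Python) =====
-- def bonacci(N, k):
--     n = -1*N
--     numbers = []
--     for i in range(N):
--         if i < (N-1):
--             numbers.append(0)
--         else:
--             numbers.append(1)
--     for i in range(k):
--         if i == (k-1):
--             numbers.append(sum(numbers[n:]))
--             return(numbers[i])
--         elif i < (N-1):
--             continue
--         else:
--             numbers.append(sum(numbers[n:]))
-- ===== SOURCE B (Python) =====
-- def bonacci(N, k):
--     # k-th query: A returns the (k-1)-th term (0-indexed) of the N-bonacci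
--     # sequence 0,...,0,1 (N-1 zeros), each next term = sum of previous N terms.
--     i = k - 1
--     if i < N - 1:
--         return 0
--     if i == N - 1:
--         return 1
--     if N <= 0:
--         # degenerate order: every term is the empty sum
--         return 0
--     terms = [0] * (N - 1) + [1]
--     s = 1  # running sum of the last N terms
--     for j in range(N, i + 1):
--         terms.append(s)
--         s += s - terms[j - N]
--     return terms[i]
-- ===== Notes on version B (the rewrite author's own statement) =====
-- stated objective: alternative
-- what changed: Instead of rebuilding and re-summing the length-N tail slice at every step, B returns the closed-form 0/1 answer for k <= N and otherwise extends the sequence once with a running window sum updated incrementally (s += s - terms[j-N]).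
-- outside the precondition, e.g. on bonacci(3, 0): A returns None, B returns 0
import Mathlib
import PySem

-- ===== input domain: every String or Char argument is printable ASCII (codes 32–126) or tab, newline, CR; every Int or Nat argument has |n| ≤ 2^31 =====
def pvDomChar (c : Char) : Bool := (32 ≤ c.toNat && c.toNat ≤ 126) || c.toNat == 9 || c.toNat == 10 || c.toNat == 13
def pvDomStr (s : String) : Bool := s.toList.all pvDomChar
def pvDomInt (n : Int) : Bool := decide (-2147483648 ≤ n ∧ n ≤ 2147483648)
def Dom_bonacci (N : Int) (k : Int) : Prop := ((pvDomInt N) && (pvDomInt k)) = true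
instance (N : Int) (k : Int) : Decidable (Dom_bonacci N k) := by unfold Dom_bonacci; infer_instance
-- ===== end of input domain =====

-- B replaces A's per-step re-summation of the length-N tail slice by a closed form for
-- k ≤ N and an incrementally updated running window sum otherwise (objective: alternative).


-- ===== PORT A =====
-- Python lists are dynamic arrays, so `numbers` is an Array with O(1) append (push).
-- sum(numbers[n:]) with n = -1*N: a one-sided Python slice clamps its start index
-- exactly like PySem.List.clampIdx (exact; proved equal to PySem.List.slice below)
def tsumA (N : Int) (numbers : Array Int) : Int :=
  -- Python's sum() adds left to right: a left fold
  (numbers.extract (PySem.List.clampIdx numbers.size (-1 * N)) numbers.size).toList.foldl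
    (· + ·) 0

-- first loop: for i in range(N): numbers.append(0 if i < N-1 else 1)
def initA (N : Int) : Array Int :=
  ((List.range N.toNat).map (fun (j : Nat) => (j : Int))).foldl
    (fun numbers i => if i < N - 1 then numbers.push 0 else numbers.push (1 : Int)) #[]

-- second loop: the early return is carried through the fold as a `Sum` state
-- (.inr = the Python has returned; pyGet? none would be Python's IndexError)
def stepA (N k : Int) (st : Sum (Array Int) (Option Int)) (i : Int) :
    Sum (Array Int) (Option Int) :=
  match st with
  | .inr r => .inr r
  | .inl numbers =>
    if i = k - 1 then .inr (PySem.List.pyGet? (numbers.push (tsumA N numbers)).toList i)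
    else if i < N - 1 then .inl numbers
    else .inl (numbers.push (tsumA N numbers))

def bonacci (N : Int) (k : Int) : Int :=
  match ((List.range k.toNat).map (fun (j : Nat) => (j : Int))).foldl (stepA N k) (.inl (initA N)) with
  | .inl _ => 0          -- the Python falls off the loop and returns None: excluded by Pre_
  | .inr r => r.getD 0   -- r = none would be an IndexError: never reached for 1 ≤ k

-- ===== PORT B =====
-- one loop step: terms.append(s); s += s - terms[j-N]
-- (the index j - N is nonnegative and in range on every step: j runs over [N, k-1])
def stepB (N : Int) (st : Array Int × Int) (j : Int) : Array Int × Int :=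
  let terms := st.1.push st.2
  (terms, st.2 + (st.2 - terms.getD (j - N).toNat 0))

def bonacci_alt (N : Int) (k : Int) : Int :=
  let i := k - 1
  if i < N - 1 then 0
  else if i = N - 1 then 1
  else if N ≤ 0 then 0
  else
    let terms := (Array.replicate (N - 1).toNat (0 : Int)).push 1
    let st := ((List.range ((i + 1) - N).toNat).map (fun (j : Nat) => N + (j : Int))).foldl
      (stepB N) (terms, 1)
    st.1.getD i.toNat 0   -- terms[i]: i = k-1 is nonnegative and in range here

-- ===== PRECONDITION & SPEC =====
-- Pre_ excludes k ≤ 0, on which the Python A falls off its loop and returns None (not an int).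
def Pre_bonacci (N : Int) (k : Int) : Prop := 1 ≤ k
instance (N : Int) (k : Int) : Decidable (Pre_bonacci N k) := by unfold Pre_bonacci; infer_instance
def pvWitness_bonacci : Int × Int := (3, 7)

def Spec_bonacci (N : Int) (k : Int) (out : Int) : Prop := out = bonacci_alt N k
instance (N : Int) (k : Int) (out : Int) : Decidable (Spec_bonacci N k out) := by unfold Spec_bonacci; infer_instance

-- ===== CLAIM (what is proved, stated in full; the proofs are below) =====
def Claim_equal_bonacci : Prop := ∀ (N : Int) (k : Int), Dom_bonacci N k → Pre_bonacci N k → Spec_bonacci N k (bonacci N k)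

-- ===== LEMMAS AND PROOFS =====

-- the Python counter loops 'for i in range(a, b)' are folds over pyRange
theorem range_cast_eq_pyRange (k : Int) :
    (List.range k.toNat).map (fun (j : Nat) => (j : Int)) = PySem.List.pyRange 0 k 1 :=
  (PySem.List.pyRange_zero k).symm

theorem range_off_eq_pyRange (a b : Int) :
    (List.range (b - a).toNat).map (fun (j : Nat) => a + (j : Int)) = PySem.List.pyRange a b 1 :=
  (PySem.List.pyRange_one a b).symm

-- list-level view of the tail sum
def tsumL (N : Int) (xs : List Int) : Int :=
  (PySem.List.slice xs (some (-1 * N)) none).sum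

theorem tsumA_toList (N : Int) (a : Array Int) : tsumA N a = tsumL N a.toList := by
  rw [tsumA, tsumL, ← List.sum_eq_foldl, PySem.List.slice_some_none, Array.toList_extract,
    Array.size_eq_length_toList]
  rw [List.extract_eq_take_drop]
  rw [List.take_of_length_le (by simp [List.length_drop])]

theorem getD_toList (a : Array Int) (i : Nat) (d : Int) : a.getD i d = a.toList.getD i d := by
  unfold Array.getD List.getD
  by_cases h : i < a.size
  · rw [dif_pos h, List.getElem?_eq_getElem (by simpa [← Array.size_eq_length_toList] using h)]
    simp
  · rw [dif_neg h, List.getElem?_eq_none (by simp; omega)]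
    rfl

-- the common reference: repeatedly append the tail sum (list level)
def grow (N : Int) : List Int → Nat → List Int
  | xs, 0 => xs
  | xs, m + 1 => grow N (xs ++ [tsumL N xs]) m

theorem grow_snoc (N : Int) (xs : List Int) (m : Nat) :
    grow N xs (m + 1) = grow N xs m ++ [tsumL N (grow N xs m)] := by
  induction m generalizing xs with
  | zero => simp [grow]
  | succ m ih => rw [grow, ih, grow]

theorem length_grow (N : Int) (xs : List Int) (m : Nat) :
    (grow N xs m).length = xs.length + m := by
  induction m generalizing xs with
  | zero => simp [grow]
  | succ m ih => simp [grow, ih]; omega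

-- tsumL for positive N is the sum of the last N elements
theorem tsumL_pos (N : Int) (hN : 1 ≤ N) (xs : List Int) :
    tsumL N xs = (xs.drop (xs.length - N.toNat)).sum := by
  rw [tsumL, PySem.List.slice_some_none]
  have h : -1 * N = -((N.toNat : Nat) : Int) := by omega
  rw [h, PySem.List.clampIdx_neg_natCast _ _ (by omega)]

-- the window-sum update is exact
theorem tsum_snoc (N : Int) (hN : 1 ≤ N) (xs : List Int) (hlen : N.toNat ≤ xs.length) :
    tsumL N (xs ++ [tsumL N xs]) =
      tsumL N xs + (tsumL N xs - xs[xs.length - N.toNat]'(by omega)) := by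
  set s := tsumL N xs with hs
  rw [tsumL_pos N hN]
  have h1 : (xs ++ [s]).length - N.toNat = (xs.length - N.toNat) + 1 := by
    simp; omega
  rw [h1, List.drop_append_of_le_length (by omega), List.sum_append]
  have h2 : xs.drop (xs.length - N.toNat)
      = xs[xs.length - N.toNat]'(by omega) :: xs.drop (xs.length - N.toNat + 1) :=
    List.drop_eq_getElem_cons (by omega)
  have h3 : s = xs[xs.length - N.toNat]'(by omega) + (xs.drop (xs.length - N.toNat + 1)).sum := by
    rw [hs, tsumL_pos N hN, h2, List.sum_cons]
  simp only [List.sum_cons, List.sum_nil, add_zero]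
  omega

-- A's skip phase: while i < min (k-1) (N-1) nothing changes
theorem stepA_skip (N k : Int) : ∀ (m : Nat) (i : Int) (a : Array Int),
    i + m ≤ k - 1 → i + m ≤ N - 1 →
    (PySem.List.pyRange i k 1).foldl (stepA N k) (.inl a)
      = (PySem.List.pyRange (i + m) k 1).foldl (stepA N k) (.inl a) := by
  intro m
  induction m with
  | zero => intro i a _ _; rw [show i + ((0:Nat):Int) = i by omega]
  | succ m ih =>
    intro i a h1 h2
    rw [PySem.List.pyRange_one_cons (by omega), List.foldl_cons]
    have hst : stepA N k (.inl a) i = .inl a := by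
      rw [stepA]; rw [if_neg (by omega), if_pos (by omega)]
    rw [hst, ih (i + 1) a (by omega) (by omega),
      show i + 1 + (m:Int) = i + ((m:Nat)+1:Nat) by push_cast; ring]

-- array-level grow
def growA (N : Int) : Array Int → Nat → Array Int
  | a, 0 => a
  | a, m + 1 => growA N (a.push (tsumA N a)) m

theorem toList_growA (N : Int) : ∀ (m : Nat) (a : Array Int),
    (growA N a m).toList = grow N a.toList m := by
  intro m
  induction m with
  | zero => intro a; rfl
  | succ m ih =>
    intro a
    rw [growA, grow, ih, Array.toList_push, tsumA_toList]

-- A's append phase: from i ≥ N-1 on, every step appends the tail sum and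
-- the fold ends in the returned element k-1
theorem stepA_append (N k : Int) : ∀ (m : Nat) (i : Int) (a : Array Int),
    i + m = k - 1 → N - 1 ≤ i →
    (PySem.List.pyRange i k 1).foldl (stepA N k) (.inl a)
      = .inr (PySem.List.pyGet? (growA N a (m + 1)).toList (k - 1)) := by
  intro m
  induction m with
  | zero =>
    intro i a h1 _
    rw [show i = k - 1 by omega, PySem.List.pyRange_one_cons (by omega),
      (show k - 1 + 1 = k by ring), PySem.List.pyRange_one_eq_nil (le_refl k),
      List.foldl_cons, stepA, if_pos rfl]
    rfl
  | succ m ih =>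
    intro i a h1 h2
    rw [PySem.List.pyRange_one_cons (by omega), List.foldl_cons]
    have hst : stepA N k (.inl a) i = .inl (a.push (tsumA N a)) := by
      rw [stepA]; rw [if_neg (by omega), if_neg (by omega)]
    rw [hst, ih (i + 1) _ (by omega) (by omega)]
    rfl

-- A's first loop builds N-1 zeros then a one
theorem initA_prefix (N : Int) : ∀ (n : Nat), (n : Int) ≤ N - 1 →
    ((PySem.List.pyRange 0 n 1).foldl
      (fun numbers i => if i < N - 1 then numbers.push 0 else numbers.push (1 : Int))
      (#[] : Array Int)).toList
    = List.replicate n (0 : Int) := by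
  intro n
  induction n with
  | zero => intro _; rw [PySem.List.pyRange_one_eq_nil (by omega)]; rfl
  | succ n ih =>
    intro h
    rw [show ((n+1 : Nat) : Int) = (n : Int) + 1 by push_cast; ring,
      PySem.List.pyRange_one_succ_right (by omega), List.foldl_append]
    simp only [List.foldl]
    rw [if_pos (by omega), Array.toList_push, ih (by omega), List.replicate_succ']

theorem initA_eq (N : Int) (hN : 1 ≤ N) :
    (initA N).toList = List.replicate (N - 1).toNat (0 : Int) ++ [1] := by
  rw [initA, range_cast_eq_pyRange N, show N = ((N - 1).toNat : Int) + 1 by omega,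
    PySem.List.pyRange_one_succ_right (by omega), List.foldl_append]
  simp only [List.foldl]
  rw [if_neg (by omega), Array.toList_push, initA_prefix _ _ (by omega)]
  congr 2
  omega

theorem length_initA (N : Int) (hN : 1 ≤ N) : (initA N).toList.length = N.toNat := by
  rw [initA_eq N hN]; simp; omega

-- all-zero lists stay all-zero (the N ≤ 0 case)
theorem tsumL_zero (N : Int) (xs : List Int) (h : ∀ x ∈ xs, x = 0) : tsumL N xs = 0 := by
  rw [tsumL]
  exact List.sum_eq_zero fun x hx => h x (PySem.List.mem_of_mem_slice _ _ _ hx)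

theorem stepA_zero (N k : Int) (hN : N ≤ 0) : ∀ (m : Nat) (i : Int) (a : Array Int),
    0 ≤ i → i + m = k - 1 → (∀ x ∈ a.toList, x = 0) →
    ∃ r : Option Int, (PySem.List.pyRange i k 1).foldl (stepA N k) (.inl a) = .inr r ∧
      r.getD 0 = 0 := by
  intro m
  induction m with
  | zero =>
    intro i a h0 h1 hz
    rw [show i = k - 1 by omega, PySem.List.pyRange_one_cons (by omega),
      (show k - 1 + 1 = k by ring), PySem.List.pyRange_one_eq_nil (le_refl k),
      List.foldl_cons, stepA, if_pos rfl]
    refine ⟨_, rfl, ?_⟩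
    have hz' : ∀ x ∈ (a.push (tsumA N a)).toList, x = 0 := by
      intro x hx
      rw [Array.toList_push] at hx
      rcases List.mem_append.mp hx with h | h
      · exact hz x h
      · simp at h; rw [h, tsumA_toList, tsumL_zero N _ hz]
    cases hg : PySem.List.pyGet? (a.push (tsumA N a)).toList (k - 1) with
    | none => rfl
    | some v =>
      simpa using hz' v (PySem.List.mem_of_pyGet?_eq_some _ hg)
  | succ m ih =>
    intro i a h0 h1 hz
    rw [PySem.List.pyRange_one_cons (by omega), List.foldl_cons]
    have hst : stepA N k (.inl a) i = .inl (a.push (tsumA N a)) := by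
      rw [stepA]; rw [if_neg (by omega), if_neg (by omega)]
    rw [hst]
    refine ih (i + 1) _ (by omega) (by omega) ?_
    intro x hx
    rw [Array.toList_push] at hx
    rcases List.mem_append.mp hx with h | h
    · exact hz x h
    · simp at h; rw [h, tsumA_toList, tsumL_zero N _ hz]

-- B's fold computes growA together with its running window sum
theorem foldB_grow (N : Int) (hN : 1 ≤ N) : ∀ (m : Nat) (terms : Array Int),
    N.toNat ≤ terms.size →
    (PySem.List.pyRange (terms.size : Int) ((terms.size : Int) + m) 1).foldl
        (stepB N) (terms, tsumA N terms)
      = (growA N terms m, tsumA N (growA N terms m)) := by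
  intro m
  induction m with
  | zero => intro terms _; rw [PySem.List.pyRange_one_eq_nil (by omega)]; rfl
  | succ m ih =>
    intro terms hlen
    rw [PySem.List.pyRange_one_cons (by omega), List.foldl_cons]
    have hsize : terms.size = terms.toList.length := Array.size_eq_length_toList
    have hstep : stepB N (terms, tsumA N terms) (terms.size : Int)
        = (terms.push (tsumA N terms), tsumA N (terms.push (tsumA N terms))) := by
      rw [stepB]
      dsimp only
      congr 1
      have hidx : ((terms.size : Int) - N).toNat = terms.toList.length - N.toNat := by
        omega
      rw [hidx, getD_toList, Array.toList_push]
      have hlt' : terms.toList.length - N.toNat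
          < (terms.toList ++ [tsumA N terms]).length := by
        simp only [List.length_append, List.length_cons, List.length_nil]; omega
      rw [List.getD_eq_getElem _ _ hlt', List.getElem_append_left (by omega)]
      simp only [tsumA_toList, Array.toList_push]
      exact (tsum_snoc N hN terms.toList (by omega)).symm
    rw [hstep]
    have h2 := ih (terms.push (tsumA N terms)) (by rw [Array.size_push]; omega)
    rw [Array.size_push] at h2
    rw [show ((terms.size + 1 : Nat) : Int) = (terms.size : Int) + 1 by push_cast; ring] at h2
    rw [show (terms.size : Int) + (m + 1 : Nat) = (terms.size : Int) + 1 + m by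
      push_cast; ring, h2, growA]

-- initial window sum is 1
theorem tsumL_init (N : Int) (hN : 1 ≤ N) :
    tsumL N (List.replicate (N - 1).toNat (0 : Int) ++ [1]) = 1 := by
  rw [tsumL_pos N hN]
  have h : (List.replicate (N - 1).toNat (0 : Int) ++ [1]).length - N.toNat = 0 := by
    simp; omega
  rw [h, List.drop_zero, List.sum_append, List.sum_replicate]
  simp

-- prefix of grow is stable
theorem pyGet?_grow_succ (N : Int) (xs : List Int) (m : Nat) (i : Int)
    (h0 : 0 ≤ i) (h1 : i < ((grow N xs m).length : Int)) :
    PySem.List.pyGet? (grow N xs (m + 1)) i = PySem.List.pyGet? (grow N xs m) i := by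
  rw [grow_snoc, PySem.List.pyGet?_of_nonneg _ h0, PySem.List.pyGet?_of_nonneg _ h0,
    List.getElem?_append_left (by omega)]

-- ===== VERDICT (by name: the statement is the Claim_ definition above) =====
theorem bonacci_spec : Claim_equal_bonacci := by
  intro N k _ hk
  replace hk : 1 ≤ k := hk
  unfold Spec_bonacci bonacci bonacci_alt
  dsimp only
  rw [range_cast_eq_pyRange k, range_off_eq_pyRange N (k - 1 + 1)]
  by_cases hN0 : N ≤ 0
  · -- N ≤ 0: A's list is all zeros, B's guard returns 0
    rw [if_neg (by omega), if_neg (by omega), if_pos hN0]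
    have hinit : initA N = #[] := by
      rw [initA, show N.toNat = 0 by omega]; rfl
    rw [hinit]
    obtain ⟨r, hr, hr0⟩ :=
      stepA_zero N k hN0 (k - 1).toNat 0 #[] (le_refl 0) (by omega) (by simp)
    rw [hr]
    exact hr0
  · have hN : 1 ≤ N := by omega
    by_cases hkN : k ≤ N
    · -- closed-form region: the answer is still inside the initial list
      have hskip := stepA_skip N k (k - 1).toNat 0 (initA N) (by omega) (by omega)
      rw [show (0 : Int) + (((k-1).toNat : Nat) : Int) = k - 1 by omega] at hskip
      rw [hskip, PySem.List.pyRange_one_cons (by omega),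
        (show k - 1 + 1 = k by ring), PySem.List.pyRange_one_eq_nil (le_refl k),
        List.foldl_cons, stepA, if_pos rfl]
      rw [List.foldl_nil]
      rw [PySem.List.pyGet?_eq_some_getElem _ (by omega)
          (by rw [Array.toList_push]
              simp only [List.length_append, List.length_cons, List.length_nil,
                length_initA N hN]
              omega)]
      dsimp only
      simp only [Array.toList_push]
      rw [List.getElem_append_left (by rw [length_initA N hN]; omega)]
      simp only [initA_eq N hN]
      by_cases hlast : k - 1 = N - 1
      · rw [if_neg (by omega), if_pos hlast]
        rw [List.getElem_append_right (by simp; omega)]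
        simp
      · rw [if_pos (by omega)]
        rw [List.getElem_append_left (by simp; omega)]
        simp
    · -- recurrence region: both sides are element k-1 of the grown sequence
      have hkN' : N + 1 ≤ k := by omega
      rw [if_neg (by omega), if_neg (by omega), if_neg (by omega)]
      -- A side: skip to i = N-1, then run the append phase
      have hskip := stepA_skip N k (N - 1).toNat 0 (initA N) (by omega) (by omega)
      rw [show (0 : Int) + (((N-1).toNat : Nat) : Int) = N - 1 by omega] at hskip
      have happ := stepA_append N k (k - N).toNat (N - 1) (initA N) (by omega) (by omega)
      rw [hskip, happ]
      dsimp only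
      -- B side: the fold computes growA
      have hT : ((Array.replicate (N - 1).toNat (0 : Int)).push 1).size = N.toNat := by
        rw [Array.size_push, Array.size_replicate]; omega
      have hT' : ((Array.replicate (N - 1).toNat (0 : Int)).push 1).toList
          = List.replicate (N - 1).toNat (0 : Int) ++ [1] := by
        rw [Array.toList_push, Array.toList_replicate]
      have ht1 : tsumA N ((Array.replicate (N - 1).toNat (0 : Int)).push 1) = 1 := by
        rw [tsumA_toList, hT', tsumL_init N hN]
      have hfold := foldB_grow N hN (k - N).toNat
        ((Array.replicate (N - 1).toNat (0 : Int)).push 1) (by omega)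
      rw [hT] at hfold
      rw [show ((N.toNat : Nat) : Int) = N by omega] at hfold
      rw [show N + (((k - N).toNat : Nat) : Int) = k - 1 + 1 by omega] at hfold
      rw [ht1] at hfold
      rw [hfold]
      -- both sides are the same stable element of grow
      have hlenG : (grow N ((Array.replicate (N - 1).toNat (0 : Int)).push 1).toList
          (k - N).toNat).length = N.toNat + (k - N).toNat := by
        rw [length_grow, hT']
        simp only [List.length_append, List.length_replicate, List.length_cons,
          List.length_nil]
        omega
      have hA : (growA N (initA N) ((k - N).toNat + 1)).toList
          = grow N ((Array.replicate (N - 1).toNat (0 : Int)).push 1).toList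
              ((k - N).toNat + 1) := by
        rw [toList_growA]
        congr 1
        rw [initA_eq N hN, hT']
      rw [hA, pyGet?_grow_succ N _ (k - N).toNat (k - 1) (by omega)
        (by rw [hlenG]; push_cast; omega)]
      rw [getD_toList, toList_growA, hT']
      rw [← hT']
      rw [PySem.List.pyGet?_eq_some_getElem _ (by omega) (by rw [hlenG]; push_cast; omega)]
      rw [Option.getD_some, List.getD_eq_getElem _ _ (by rw [hlenG]; omega)]
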